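-- pv_equiv track=rewrite | github.com/stormalinblue/adventofcode | 2023/day03/part2.py | numbers_in_line
-- ===== SOURCE A (Python) =====
-- def numbers_in_line(line, index):
--     if not line:
--         return []
--     number_str = ""
--     for char in line:
--         if not char.isdigit():
--             break
--         number_str += char
--     if number_str:
--         num_len = len(number_str)
--         return [(int(number_str), (index, index + num_len - 1))] + numbers_in_line(line[num_len:], index + num_len)
--     else:
--         return numbers_in_line(line[1:], index + 1)
-- ===== SOURCE B (Python) =====
-- def numbers_in_line(line, index):
--     runs = []
--     cur = ""
--     start = 0
--     i = 0
--     for ch in line: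
--         if ch.isdigit():
--             if not cur:
--                 start = i
--             cur += ch
--         elif cur:
--             runs.append((cur, start))
--             cur = ""
--         i += 1
--     if cur:
--         runs.append((cur, start))
--     return [(int(s), (index + st, index + st + len(s) - 1)) for s, st in runs]
-- ===== Notes on version B (the rewrite author's own statement) =====
-- stated objective: faster
-- what changed: Replaced A's recursion that re-slices the remaining string on every step (line[num_len:]/line[1:], quadratic copying) by a single linear left-to-right scan that groups consecutive digits into runs and formats them at the end.
import Mathlib
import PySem

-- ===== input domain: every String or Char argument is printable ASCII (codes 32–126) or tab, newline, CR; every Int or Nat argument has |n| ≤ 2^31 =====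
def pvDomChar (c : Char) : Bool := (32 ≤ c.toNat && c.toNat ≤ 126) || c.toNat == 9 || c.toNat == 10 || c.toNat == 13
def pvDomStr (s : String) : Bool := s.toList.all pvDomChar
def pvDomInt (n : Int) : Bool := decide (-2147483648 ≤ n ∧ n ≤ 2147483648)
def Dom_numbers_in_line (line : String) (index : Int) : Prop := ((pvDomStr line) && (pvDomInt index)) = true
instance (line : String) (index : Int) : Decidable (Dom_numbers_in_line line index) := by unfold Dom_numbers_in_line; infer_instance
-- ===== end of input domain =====

-- B replaces A's recursion with repeated slicing (quadratic copying) by one linear left-to-right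
-- scan that groups consecutive digits into runs; objective: faster (asymptotic, O(n^2) → O(n)).

-- int(s) for a nonempty all-digit run s: on every argument the two programs pass it, int() succeeds,
-- so the `.getD 0` default is never taken.
def pyInt (ds : List Char) : Int := (PySem.Int.ofChars? ds).getD 0

-- ===== PORT A =====
-- A works on the string as a list of code points; the prefix-collecting loop
-- ("for char in line: if not char.isdigit(): break; number_str += char") is takeWhile isdigit,
-- line[k:] is List.drop k (k is nonnegative and ≤ len).
def numsA : List Char → Int → List (Int × (Int × Int))
  | [], _ => []
  | c :: cs, index =>
    let number_str := (c :: cs).takeWhile PySem.Chars.isdigit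
    if number_str ≠ [] then
      (pyInt number_str, (index, index + number_str.length - 1)) ::
        numsA ((c :: cs).drop number_str.length) (index + number_str.length)
    else
      numsA cs (index + 1)
  termination_by l _ => l.length
  decreasing_by
  · have h1 : ((c :: cs).takeWhile PySem.Chars.isdigit).length ≤ (c :: cs).length :=
      (List.takeWhile_prefix _).length_le
    have h2 : 0 < ((c :: cs).takeWhile PySem.Chars.isdigit).length :=
      List.length_pos_iff.mpr (by simpa [number_str] using ‹number_str ≠ []›)
    simp only [List.length_drop]
    omega
  · simp

def numbers_in_line (line : String) (index : Int) : List (Int × (Int × Int)) :=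
  numsA line.toList index

-- ===== PORT B =====
-- state = (runs, cur, start, i): finished runs, current digit run, its start position, position
def stepB (st : List (List Char × Nat) × List Char × Nat × Nat) (ch : Char) :
    List (List Char × Nat) × List Char × Nat × Nat :=
  let (runs, cur, start, i) := st
  if PySem.Chars.isdigit ch then
    let start' := if cur = [] then i else start
    (runs, cur ++ [ch], start', i + 1)
  else if cur ≠ [] then
    (runs ++ [(cur, start)], [], start, i + 1)
  else
    (runs, cur, start, i + 1)

def numbers_in_line_alt (line : String) (index : Int) : List (Int × (Int × Int)) :=
  let st := line.toList.foldl stepB ([], [], 0, 0)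
  let runs := if st.2.1 ≠ [] then st.1 ++ [(st.2.1, st.2.2.1)] else st.1
  runs.map (fun r => (pyInt r.1, (index + (r.2 : Int), index + (r.2 : Int) + (r.1.length : Int) - 1)))

-- ===== PRECONDITION & SPEC =====
def Spec_numbers_in_line (line : String) (index : Int) (out : List (Int × (Int × Int))) : Prop := out = numbers_in_line_alt line index
instance (line : String) (index : Int) (out : List (Int × (Int × Int))) : Decidable (Spec_numbers_in_line line index out) := by unfold Spec_numbers_in_line; infer_instance

-- ===== CLAIM (what is proved, stated in full; the proofs are below) =====
def Claim_equal_numbers_in_line : Prop := ∀ (line : String) (index : Int), Dom_numbers_in_line line index → Spec_numbers_in_line line index (numbers_in_line line index)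

-- ===== LEMMAS AND PROOFS =====

-- the runs (digit substring, start position) that both programs extract
def runsR : List Char → Nat → List (List Char × Nat)
  | [], _ => []
  | c :: cs, i =>
    let p := (c :: cs).takeWhile PySem.Chars.isdigit
    if p ≠ [] then (p, i) :: runsR ((c :: cs).drop p.length) (i + p.length)
    else runsR cs (i + 1)
  termination_by l _ => l.length
  decreasing_by
  · have h1 : ((c :: cs).takeWhile PySem.Chars.isdigit).length ≤ (c :: cs).length :=
      (List.takeWhile_prefix _).length_le
    have h2 : 0 < ((c :: cs).takeWhile PySem.Chars.isdigit).length :=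
      List.length_pos_iff.mpr (by simpa [p] using ‹p ≠ []›)
    simp only [List.length_drop]
    omega
  · simp

def fmt (index : Int) (r : List Char × Nat) : Int × (Int × Int) :=
  (pyInt r.1, (index + (r.2 : Int), index + (r.2 : Int) + (r.1.length : Int) - 1))

def flushB (st : List (List Char × Nat) × List Char × Nat × Nat) : List (List Char × Nat) :=
  if st.2.1 ≠ [] then st.1 ++ [(st.2.1, st.2.2.1)] else st.1

theorem drop_takeWhile_len {α : Type} (p : α → Bool) (l : List α) :
    l.drop (l.takeWhile p).length = l.dropWhile p := by
  induction l with
  | nil => simp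
  | cons c cs ih => by_cases h : p c <;> simp [h, ih]

-- A's recursion produces exactly the formatted runs
theorem numsA_eq_runsR : ∀ (n : Nat) (l : List Char), l.length ≤ n →
    ∀ (i : Nat) (index : Int), numsA l (index + (i : Int)) = (runsR l i).map (fmt index) := by
  intro n
  induction n with
  | zero =>
    intro l hl
    have h0 : l = [] := List.length_eq_zero_iff.mp (by omega)
    subst h0
    intro i index
    simp [numsA, runsR]
  | succ n ih =>
    intro l hl i index
    match l with
    | [] => simp [numsA, runsR]
    | c :: cs =>
      rw [numsA, runsR]
      by_cases hd : PySem.Chars.isdigit c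
      · have hp : (c :: cs).takeWhile PySem.Chars.isdigit ≠ [] := by
          simp [hd]
        have h2 : 0 < ((c :: cs).takeWhile PySem.Chars.isdigit).length :=
          List.length_pos_iff.mpr hp
        have h1 : ((c :: cs).takeWhile PySem.Chars.isdigit).length ≤ (c :: cs).length :=
          (List.takeWhile_prefix _).length_le
        have hlen : ((c :: cs).drop ((c :: cs).takeWhile PySem.Chars.isdigit).length).length ≤ n := by
          simp only [List.length_drop, List.length_cons] at *
          omega
        simp only [hp, ne_eq, not_false_eq_true, if_true]
        rw [List.map_cons]
        congr 1
        rw [show index + (i : Int) + (((c :: cs).takeWhile PySem.Chars.isdigit).length : Int)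
            = index + ((i + ((c :: cs).takeWhile PySem.Chars.isdigit).length : Nat) : Int) by push_cast; ring]
        exact ih _ hlen (i + ((c :: cs).takeWhile PySem.Chars.isdigit).length) index
      · have hp : (c :: cs).takeWhile PySem.Chars.isdigit = [] := by
          simp [hd]
        simp only [hp, ne_eq, not_true_eq_false, if_false]
        have hcs : cs.length ≤ n := by simp only [List.length_cons] at hl; omega
        rw [show index + (i : Int) + 1 = index + ((i + 1 : Nat) : Int) by push_cast; ring]
        exact ih cs hcs (i + 1) index

-- B's fold-and-flush produces the same runs: fresh-state and in-run invariants together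
theorem foldB_runs : ∀ (n : Nat) (l : List Char), l.length ≤ n →
    (∀ (runs : List (List Char × Nat)) (s i : Nat),
        flushB (l.foldl stepB (runs, [], s, i)) = runs ++ runsR l i) ∧
    (∀ (runs : List (List Char × Nat)) (cur : List Char) (s i : Nat), cur ≠ [] →
        flushB (l.foldl stepB (runs, cur, s, i)) =
          runs ++ (cur ++ l.takeWhile PySem.Chars.isdigit, s) ::
            runsR (l.dropWhile PySem.Chars.isdigit)
              (i + (l.takeWhile PySem.Chars.isdigit).length)) := by
  intro n
  induction n with
  | zero =>
    intro l hl
    have h0 : l = [] := List.length_eq_zero_iff.mp (by omega)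
    subst h0
    constructor
    · intro runs s i; simp [flushB, runsR]
    · intro runs cur s i hcur; simp [flushB, hcur, runsR]
  | succ n ih =>
    intro l hl
    match l with
    | [] =>
      constructor
      · intro runs s i; simp [flushB, runsR]
      · intro runs cur s i hcur; simp [flushB, hcur, runsR]
    | c :: cs =>
      have hcs : cs.length ≤ n := by simp only [List.length_cons] at hl; omega
      constructor
      · intro runs s i
        by_cases hd : PySem.Chars.isdigit c
        · -- a run starts at position i
          have hstep : List.foldl stepB (runs, [], s, i) (c :: cs)
              = List.foldl stepB (runs, [c], i, i + 1) cs := by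
            simp [stepB, hd]
          rw [hstep, (ih cs hcs).2 runs [c] i (i + 1) (by simp), runsR]
          have hp : (c :: cs).takeWhile PySem.Chars.isdigit ≠ [] := by simp [hd]
          simp only [hp, ne_eq, not_false_eq_true, if_true]
          congr 1
          rw [List.takeWhile_cons, if_pos hd]
          congr 1
          · rw [show (c :: cs).drop (c :: cs.takeWhile PySem.Chars.isdigit).length
                = cs.drop (cs.takeWhile PySem.Chars.isdigit).length by simp,
              drop_takeWhile_len]
            congr 1
            simp
            omega
        · -- a non-digit outside a run: nothing happens
          have hstep : List.foldl stepB (runs, [], s, i) (c :: cs)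
              = List.foldl stepB (runs, [], s, i + 1) cs := by
            simp [stepB, hd]
          rw [hstep, (ih cs hcs).1 runs s (i + 1), runsR]
          have hp : (c :: cs).takeWhile PySem.Chars.isdigit = [] := by simp [hd]
          simp only [hp, ne_eq, not_true_eq_false, if_false]
      · intro runs cur s i hcur
        by_cases hd : PySem.Chars.isdigit c
        · -- the run continues
          have hstep : List.foldl stepB (runs, cur, s, i) (c :: cs)
              = List.foldl stepB (runs, cur ++ [c], s, i + 1) cs := by
            simp [stepB, hd, hcur]
          rw [hstep, (ih cs hcs).2 runs (cur ++ [c]) s (i + 1) (by simp),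
            List.takeWhile_cons, if_pos hd, List.dropWhile_cons_of_pos hd]
          congr 2
          · simp
          · congr 1
            simp
            omega
        · -- the run closes at c
          have hstep : List.foldl stepB (runs, cur, s, i) (c :: cs)
              = List.foldl stepB (runs ++ [(cur, s)], [], s, i + 1) cs := by
            simp [stepB, hd, hcur]
          rw [hstep, (ih cs hcs).1 (runs ++ [(cur, s)]) s (i + 1),
            List.takeWhile_cons_of_neg hd, List.dropWhile_cons_of_neg hd]
          simp [runsR, hd]

-- ===== VERDICT (by name: the statement is the Claim_ definition above) =====
theorem numbers_in_line_spec : Claim_equal_numbers_in_line := by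
  intro line index _
  unfold Spec_numbers_in_line
  have halt : numbers_in_line_alt line index
      = (flushB (line.toList.foldl stepB ([], [], 0, 0))).map (fmt index) := rfl
  have hB := (foldB_runs line.toList.length line.toList le_rfl).1 [] 0 0
  have hA := numsA_eq_runsR line.toList.length line.toList le_rfl 0 index
  simp only [Nat.cast_zero, add_zero] at hA
  rw [show numbers_in_line line index = numsA line.toList index from rfl, hA, halt, hB]
  simp
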